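-- pv_equiv track=rewrite | github.com/matbeedotcom/media-transparency | backend/src/mitds/ingestion/littlesis.py | map_littlesis_entity_type
-- ===== SOURCE A (Python) =====
-- def map_littlesis_entity_type(primary_ext: str | None, extensions: list[str]) -> tuple[str, str]:
--     """Map LittleSis entity type to MITDS entity type.
--
--     Args:
--         primary_ext: Primary extension ("Person" or "Org")
--         extensions: List of extension types
--
--     Returns:
--         Tuple of (entity_type, org_type or None)
--     """
--     if primary_ext == "Person":
--         return "PERSON", None
--
--     # Organization type mapping
--     ext_set = set(e.lower() for e in extensions)
--
--     if "nonprofit" in ext_set or "philanthropy" in ext_set: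
--         return "ORGANIZATION", "nonprofit"
--     if "politicalfundraising" in ext_set or "politicalparty" in ext_set:
--         return "ORGANIZATION", "political_org"
--     if "governmentbody" in ext_set:
--         return "ORGANIZATION", "political_org"
--     if "business" in ext_set or "publiccompany" in ext_set or "privatecompany" in ext_set:
--         return "ORGANIZATION", "corporation"
--     if "lobbyingfirm" in ext_set:
--         return "ORGANIZATION", "corporation"
--     if "school" in ext_set or "university" in ext_set:
--         return "ORGANIZATION", "unknown"
--     if "mediaorganization" in ext_set or "newspaper" in ext_set:
--         return "ORGANIZATION", "corporation"
--     if "industrygroup" in ext_set or "lawfirm" in ext_set: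
--         return "ORGANIZATION", "corporation"
--
--     # Default for organizations
--     return "ORGANIZATION", "unknown"
-- ===== SOURCE B (Python) =====
-- _RANK = {
--     "nonprofit": 0, "philanthropy": 0,
--     "politicalfundraising": 1, "politicalparty": 1, "governmentbody": 1,
--     "business": 2, "publiccompany": 2, "privatecompany": 2, "lobbyingfirm": 2,
--     "school": 3, "university": 3,
--     "mediaorganization": 4, "newspaper": 4,
--     "industrygroup": 5, "lawfirm": 5,
-- }
-- _ORG = ["nonprofit", "political_org", "corporation", "unknown", "corporation", "corporation"]
--
--
-- def map_littlesis_entity_type(primary_ext, extensions):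
--     if primary_ext == "Person":
--         return "PERSON", None
--     best = None
--     for e in extensions:
--         r = _RANK.get(e.lower())
--         if r is not None and (best is None or r < best):
--             best = r
--     return "ORGANIZATION", _ORG[best] if best is not None else "unknown"
-- ===== Notes on version B (the rewrite author's own statement) =====
-- stated objective: simpler
-- what changed: Replaces A's hand-unrolled chain of eight set-membership branches by one pass over the extensions with a keyword-to-priority dict, keeping the minimum priority seen and mapping it to the org type through a table.
import Mathlib
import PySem

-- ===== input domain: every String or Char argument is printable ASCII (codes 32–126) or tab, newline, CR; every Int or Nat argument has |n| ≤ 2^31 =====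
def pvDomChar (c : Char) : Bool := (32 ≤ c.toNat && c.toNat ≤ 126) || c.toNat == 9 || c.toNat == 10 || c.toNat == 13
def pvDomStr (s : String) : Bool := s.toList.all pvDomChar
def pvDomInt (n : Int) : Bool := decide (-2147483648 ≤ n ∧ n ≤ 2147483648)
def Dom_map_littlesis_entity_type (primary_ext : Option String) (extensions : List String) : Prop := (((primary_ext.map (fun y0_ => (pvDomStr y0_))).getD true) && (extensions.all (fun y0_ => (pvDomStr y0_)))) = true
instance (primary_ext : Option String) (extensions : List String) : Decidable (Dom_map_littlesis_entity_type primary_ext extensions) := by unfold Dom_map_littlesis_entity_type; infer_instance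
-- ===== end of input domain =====

-- B replaces A's hand-unrolled chain of eight set-membership branches by a single pass over
-- the extensions with a keyword→priority dict, keeping the minimum priority seen (simpler).

-- ===== PORT A =====
def map_littlesis_entity_type (primary_ext : Option String) (extensions : List String) : String × Option String :=
  if primary_ext = some "Person" then ("PERSON", none)
  else
    let ext_set : PySem.Set String := PySem.Set.ofList (extensions.map PySem.Str.lower)
    if PySem.Set.contains ext_set "nonprofit" || PySem.Set.contains ext_set "philanthropy" then ("ORGANIZATION", some "nonprofit")
    else if PySem.Set.contains ext_set "politicalfundraising" || PySem.Set.contains ext_set "politicalparty" then ("ORGANIZATION", some "political_org")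
    else if PySem.Set.contains ext_set "governmentbody" then ("ORGANIZATION", some "political_org")
    else if PySem.Set.contains ext_set "business" || PySem.Set.contains ext_set "publiccompany" || PySem.Set.contains ext_set "privatecompany" then ("ORGANIZATION", some "corporation")
    else if PySem.Set.contains ext_set "lobbyingfirm" then ("ORGANIZATION", some "corporation")
    else if PySem.Set.contains ext_set "school" || PySem.Set.contains ext_set "university" then ("ORGANIZATION", some "unknown")
    else if PySem.Set.contains ext_set "mediaorganization" || PySem.Set.contains ext_set "newspaper" then ("ORGANIZATION", some "corporation")
    else if PySem.Set.contains ext_set "industrygroup" || PySem.Set.contains ext_set "lawfirm" then ("ORGANIZATION", some "corporation")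
    else ("ORGANIZATION", some "unknown")

-- ===== PORT B =====
-- _RANK: keyword → priority (dict as an association list, per the type convention)
def rankTable : List (String × Nat) :=
  [("nonprofit",0),("philanthropy",0),
   ("politicalfundraising",1),("politicalparty",1),("governmentbody",1),
   ("business",2),("publiccompany",2),("privatecompany",2),("lobbyingfirm",2),
   ("school",3),("university",3),
   ("mediaorganization",4),("newspaper",4),
   ("industrygroup",5),("lawfirm",5)]

-- _RANK.get(k): first-match lookup in the association list
def rankGet (k : String) : Option Nat := (rankTable.find? (fun p => p.1 == k)).map (·.2)

-- _ORG: priority → org type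
def orgTable : List String := ["nonprofit","political_org","corporation","unknown","corporation","corporation"]

-- the loop body: r = _RANK.get(e.lower()); if r is not None and (best is None or r < best): best = r
def lsStep (best : Option Nat) (e : String) : Option Nat :=
  match rankGet (PySem.Str.lower e) with
  | none => best
  | some r =>
    match best with
    | none => some r
    | some b => if r < b then some r else best

def map_littlesis_entity_type_alt (primary_ext : Option String) (extensions : List String) : String × Option String :=
  if primary_ext = some "Person" then ("PERSON", none)
  else
    let best := extensions.foldl lsStep none
    ("ORGANIZATION", some (match best with
      | none => "unknown"
      | some i => orgTable.getD i "unknown"))  -- _ORG[best]; best is always a valid index (< 6)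

-- ===== PRECONDITION & SPEC =====
def Spec_map_littlesis_entity_type (primary_ext : Option String) (extensions : List String) (out : String × Option String) : Prop := out = map_littlesis_entity_type_alt primary_ext extensions
instance (primary_ext : Option String) (extensions : List String) (out : String × Option String) : Decidable (Spec_map_littlesis_entity_type primary_ext extensions out) := by unfold Spec_map_littlesis_entity_type; infer_instance

-- ===== CLAIM (what is proved, stated in full; the proofs are below) =====
def Claim_equal_map_littlesis_entity_type : Prop := ∀ (primary_ext : Option String) (extensions : List String), Dom_map_littlesis_entity_type primary_ext extensions → Spec_map_littlesis_entity_type primary_ext extensions (map_littlesis_entity_type primary_ext extensions)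

-- ===== LEMMAS AND PROOFS =====

-- closed-form view of the lookup in rankTable
def gchar (s : String) : Option Nat :=
  if s = "nonprofit" then some 0 else if s = "philanthropy" then some 0
  else if s = "politicalfundraising" then some 1 else if s = "politicalparty" then some 1 else if s = "governmentbody" then some 1
  else if s = "business" then some 2 else if s = "publiccompany" then some 2 else if s = "privatecompany" then some 2 else if s = "lobbyingfirm" then some 2
  else if s = "school" then some 3 else if s = "university" then some 3
  else if s = "mediaorganization" then some 4 else if s = "newspaper" then some 4
  else if s = "industrygroup" then some 5 else if s = "lawfirm" then some 5
  else none

set_option maxHeartbeats 1000000 in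
lemma rankGet_eq_gchar (s : String) : rankGet s = gchar s := by
  by_cases h1 : s = "nonprofit"
  · subst h1; decide
  by_cases h2 : s = "philanthropy"
  · subst h2; decide
  by_cases h3 : s = "politicalfundraising"
  · subst h3; decide
  by_cases h4 : s = "politicalparty"
  · subst h4; decide
  by_cases h5 : s = "governmentbody"
  · subst h5; decide
  by_cases h6 : s = "business"
  · subst h6; decide
  by_cases h7 : s = "publiccompany"
  · subst h7; decide
  by_cases h8 : s = "privatecompany"
  · subst h8; decide
  by_cases h9 : s = "lobbyingfirm"
  · subst h9; decide
  by_cases h10 : s = "school"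
  · subst h10; decide
  by_cases h11 : s = "university"
  · subst h11; decide
  by_cases h12 : s = "mediaorganization"
  · subst h12; decide
  by_cases h13 : s = "newspaper"
  · subst h13; decide
  by_cases h14 : s = "industrygroup"
  · subst h14; decide
  by_cases h15 : s = "lawfirm"
  · subst h15; decide
  have hfind : rankTable.find? (fun p => p.1 == s) = none := by
    refine List.find?_eq_none.2 ?_
    intro p hp
    fin_cases hp <;> simp only [beq_iff_eq] <;>
      first | exact fun hh => h1 hh.symm | exact fun hh => h2 hh.symm | exact fun hh => h3 hh.symm | exact fun hh => h4 hh.symm | exact fun hh => h5 hh.symm | exact fun hh => h6 hh.symm | exact fun hh => h7 hh.symm | exact fun hh => h8 hh.symm | exact fun hh => h9 hh.symm | exact fun hh => h10 hh.symm | exact fun hh => h11 hh.symm | exact fun hh => h12 hh.symm | exact fun hh => h13 hh.symm | exact fun hh => h14 hh.symm | exact fun hh => h15 hh.symm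
  unfold rankGet
  rw [hfind]
  simp [gchar, h1, h2, h3, h4, h5, h6, h7, h8, h9, h10, h11, h12, h13, h14, h15]

lemma gchar_lt6 (s : String) (r : Nat) (h : gchar s = some r) : r < 6 := by
  unfold gchar at h
  by_cases g1 : s = "nonprofit"
  · rw [if_pos g1] at h; have := Option.some.inj h; omega
  rw [if_neg g1] at h
  by_cases g2 : s = "philanthropy"
  · rw [if_pos g2] at h; have := Option.some.inj h; omega
  rw [if_neg g2] at h
  by_cases g3 : s = "politicalfundraising"
  · rw [if_pos g3] at h; have := Option.some.inj h; omega
  rw [if_neg g3] at h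
  by_cases g4 : s = "politicalparty"
  · rw [if_pos g4] at h; have := Option.some.inj h; omega
  rw [if_neg g4] at h
  by_cases g5 : s = "governmentbody"
  · rw [if_pos g5] at h; have := Option.some.inj h; omega
  rw [if_neg g5] at h
  by_cases g6 : s = "business"
  · rw [if_pos g6] at h; have := Option.some.inj h; omega
  rw [if_neg g6] at h
  by_cases g7 : s = "publiccompany"
  · rw [if_pos g7] at h; have := Option.some.inj h; omega
  rw [if_neg g7] at h
  by_cases g8 : s = "privatecompany"
  · rw [if_pos g8] at h; have := Option.some.inj h; omega
  rw [if_neg g8] at h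
  by_cases g9 : s = "lobbyingfirm"
  · rw [if_pos g9] at h; have := Option.some.inj h; omega
  rw [if_neg g9] at h
  by_cases g10 : s = "school"
  · rw [if_pos g10] at h; have := Option.some.inj h; omega
  rw [if_neg g10] at h
  by_cases g11 : s = "university"
  · rw [if_pos g11] at h; have := Option.some.inj h; omega
  rw [if_neg g11] at h
  by_cases g12 : s = "mediaorganization"
  · rw [if_pos g12] at h; have := Option.some.inj h; omega
  rw [if_neg g12] at h
  by_cases g13 : s = "newspaper"
  · rw [if_pos g13] at h; have := Option.some.inj h; omega
  rw [if_neg g13] at h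
  by_cases g14 : s = "industrygroup"
  · rw [if_pos g14] at h; have := Option.some.inj h; omega
  rw [if_neg g14] at h
  by_cases g15 : s = "lawfirm"
  · rw [if_pos g15] at h; have := Option.some.inj h; omega
  rw [if_neg g15] at h
  simp at h

lemma gchar0 (s : String) (h : gchar s = some 0) : s = "nonprofit" ∨ s = "philanthropy" := by
  unfold gchar at h
  by_cases g1 : s = "nonprofit"
  · exact Or.inl g1
  rw [if_neg g1] at h
  by_cases g2 : s = "philanthropy"
  · exact Or.inr (g2)
  rw [if_neg g2] at h
  by_cases g3 : s = "politicalfundraising"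
  · rw [if_pos g3] at h; exact absurd (Option.some.inj h) (by decide)
  rw [if_neg g3] at h
  by_cases g4 : s = "politicalparty"
  · rw [if_pos g4] at h; exact absurd (Option.some.inj h) (by decide)
  rw [if_neg g4] at h
  by_cases g5 : s = "governmentbody"
  · rw [if_pos g5] at h; exact absurd (Option.some.inj h) (by decide)
  rw [if_neg g5] at h
  by_cases g6 : s = "business"
  · rw [if_pos g6] at h; exact absurd (Option.some.inj h) (by decide)
  rw [if_neg g6] at h
  by_cases g7 : s = "publiccompany"
  · rw [if_pos g7] at h; exact absurd (Option.some.inj h) (by decide)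
  rw [if_neg g7] at h
  by_cases g8 : s = "privatecompany"
  · rw [if_pos g8] at h; exact absurd (Option.some.inj h) (by decide)
  rw [if_neg g8] at h
  by_cases g9 : s = "lobbyingfirm"
  · rw [if_pos g9] at h; exact absurd (Option.some.inj h) (by decide)
  rw [if_neg g9] at h
  by_cases g10 : s = "school"
  · rw [if_pos g10] at h; exact absurd (Option.some.inj h) (by decide)
  rw [if_neg g10] at h
  by_cases g11 : s = "university"
  · rw [if_pos g11] at h; exact absurd (Option.some.inj h) (by decide)
  rw [if_neg g11] at h
  by_cases g12 : s = "mediaorganization"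
  · rw [if_pos g12] at h; exact absurd (Option.some.inj h) (by decide)
  rw [if_neg g12] at h
  by_cases g13 : s = "newspaper"
  · rw [if_pos g13] at h; exact absurd (Option.some.inj h) (by decide)
  rw [if_neg g13] at h
  by_cases g14 : s = "industrygroup"
  · rw [if_pos g14] at h; exact absurd (Option.some.inj h) (by decide)
  rw [if_neg g14] at h
  by_cases g15 : s = "lawfirm"
  · rw [if_pos g15] at h; exact absurd (Option.some.inj h) (by decide)
  rw [if_neg g15] at h
  simp at h

lemma gchar1 (s : String) (h : gchar s = some 1) : s = "politicalfundraising" ∨ s = "politicalparty" ∨ s = "governmentbody" := by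
  unfold gchar at h
  by_cases g1 : s = "nonprofit"
  · rw [if_pos g1] at h; exact absurd (Option.some.inj h) (by decide)
  rw [if_neg g1] at h
  by_cases g2 : s = "philanthropy"
  · rw [if_pos g2] at h; exact absurd (Option.some.inj h) (by decide)
  rw [if_neg g2] at h
  by_cases g3 : s = "politicalfundraising"
  · exact Or.inl g3
  rw [if_neg g3] at h
  by_cases g4 : s = "politicalparty"
  · exact Or.inr (Or.inl g4)
  rw [if_neg g4] at h
  by_cases g5 : s = "governmentbody"
  · exact Or.inr (Or.inr (g5))
  rw [if_neg g5] at h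
  by_cases g6 : s = "business"
  · rw [if_pos g6] at h; exact absurd (Option.some.inj h) (by decide)
  rw [if_neg g6] at h
  by_cases g7 : s = "publiccompany"
  · rw [if_pos g7] at h; exact absurd (Option.some.inj h) (by decide)
  rw [if_neg g7] at h
  by_cases g8 : s = "privatecompany"
  · rw [if_pos g8] at h; exact absurd (Option.some.inj h) (by decide)
  rw [if_neg g8] at h
  by_cases g9 : s = "lobbyingfirm"
  · rw [if_pos g9] at h; exact absurd (Option.some.inj h) (by decide)
  rw [if_neg g9] at h
  by_cases g10 : s = "school"
  · rw [if_pos g10] at h; exact absurd (Option.some.inj h) (by decide)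
  rw [if_neg g10] at h
  by_cases g11 : s = "university"
  · rw [if_pos g11] at h; exact absurd (Option.some.inj h) (by decide)
  rw [if_neg g11] at h
  by_cases g12 : s = "mediaorganization"
  · rw [if_pos g12] at h; exact absurd (Option.some.inj h) (by decide)
  rw [if_neg g12] at h
  by_cases g13 : s = "newspaper"
  · rw [if_pos g13] at h; exact absurd (Option.some.inj h) (by decide)
  rw [if_neg g13] at h
  by_cases g14 : s = "industrygroup"
  · rw [if_pos g14] at h; exact absurd (Option.some.inj h) (by decide)
  rw [if_neg g14] at h
  by_cases g15 : s = "lawfirm"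
  · rw [if_pos g15] at h; exact absurd (Option.some.inj h) (by decide)
  rw [if_neg g15] at h
  simp at h

lemma gchar2 (s : String) (h : gchar s = some 2) : s = "business" ∨ s = "publiccompany" ∨ s = "privatecompany" ∨ s = "lobbyingfirm" := by
  unfold gchar at h
  by_cases g1 : s = "nonprofit"
  · rw [if_pos g1] at h; exact absurd (Option.some.inj h) (by decide)
  rw [if_neg g1] at h
  by_cases g2 : s = "philanthropy"
  · rw [if_pos g2] at h; exact absurd (Option.some.inj h) (by decide)
  rw [if_neg g2] at h
  by_cases g3 : s = "politicalfundraising"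
  · rw [if_pos g3] at h; exact absurd (Option.some.inj h) (by decide)
  rw [if_neg g3] at h
  by_cases g4 : s = "politicalparty"
  · rw [if_pos g4] at h; exact absurd (Option.some.inj h) (by decide)
  rw [if_neg g4] at h
  by_cases g5 : s = "governmentbody"
  · rw [if_pos g5] at h; exact absurd (Option.some.inj h) (by decide)
  rw [if_neg g5] at h
  by_cases g6 : s = "business"
  · exact Or.inl g6
  rw [if_neg g6] at h
  by_cases g7 : s = "publiccompany"
  · exact Or.inr (Or.inl g7)
  rw [if_neg g7] at h
  by_cases g8 : s = "privatecompany"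
  · exact Or.inr (Or.inr (Or.inl g8))
  rw [if_neg g8] at h
  by_cases g9 : s = "lobbyingfirm"
  · exact Or.inr (Or.inr (Or.inr (g9)))
  rw [if_neg g9] at h
  by_cases g10 : s = "school"
  · rw [if_pos g10] at h; exact absurd (Option.some.inj h) (by decide)
  rw [if_neg g10] at h
  by_cases g11 : s = "university"
  · rw [if_pos g11] at h; exact absurd (Option.some.inj h) (by decide)
  rw [if_neg g11] at h
  by_cases g12 : s = "mediaorganization"
  · rw [if_pos g12] at h; exact absurd (Option.some.inj h) (by decide)
  rw [if_neg g12] at h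
  by_cases g13 : s = "newspaper"
  · rw [if_pos g13] at h; exact absurd (Option.some.inj h) (by decide)
  rw [if_neg g13] at h
  by_cases g14 : s = "industrygroup"
  · rw [if_pos g14] at h; exact absurd (Option.some.inj h) (by decide)
  rw [if_neg g14] at h
  by_cases g15 : s = "lawfirm"
  · rw [if_pos g15] at h; exact absurd (Option.some.inj h) (by decide)
  rw [if_neg g15] at h
  simp at h

lemma gchar3 (s : String) (h : gchar s = some 3) : s = "school" ∨ s = "university" := by
  unfold gchar at h
  by_cases g1 : s = "nonprofit"
  · rw [if_pos g1] at h; exact absurd (Option.some.inj h) (by decide)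
  rw [if_neg g1] at h
  by_cases g2 : s = "philanthropy"
  · rw [if_pos g2] at h; exact absurd (Option.some.inj h) (by decide)
  rw [if_neg g2] at h
  by_cases g3 : s = "politicalfundraising"
  · rw [if_pos g3] at h; exact absurd (Option.some.inj h) (by decide)
  rw [if_neg g3] at h
  by_cases g4 : s = "politicalparty"
  · rw [if_pos g4] at h; exact absurd (Option.some.inj h) (by decide)
  rw [if_neg g4] at h
  by_cases g5 : s = "governmentbody"
  · rw [if_pos g5] at h; exact absurd (Option.some.inj h) (by decide)
  rw [if_neg g5] at h
  by_cases g6 : s = "business"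
  · rw [if_pos g6] at h; exact absurd (Option.some.inj h) (by decide)
  rw [if_neg g6] at h
  by_cases g7 : s = "publiccompany"
  · rw [if_pos g7] at h; exact absurd (Option.some.inj h) (by decide)
  rw [if_neg g7] at h
  by_cases g8 : s = "privatecompany"
  · rw [if_pos g8] at h; exact absurd (Option.some.inj h) (by decide)
  rw [if_neg g8] at h
  by_cases g9 : s = "lobbyingfirm"
  · rw [if_pos g9] at h; exact absurd (Option.some.inj h) (by decide)
  rw [if_neg g9] at h
  by_cases g10 : s = "school"
  · exact Or.inl g10
  rw [if_neg g10] at h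
  by_cases g11 : s = "university"
  · exact Or.inr (g11)
  rw [if_neg g11] at h
  by_cases g12 : s = "mediaorganization"
  · rw [if_pos g12] at h; exact absurd (Option.some.inj h) (by decide)
  rw [if_neg g12] at h
  by_cases g13 : s = "newspaper"
  · rw [if_pos g13] at h; exact absurd (Option.some.inj h) (by decide)
  rw [if_neg g13] at h
  by_cases g14 : s = "industrygroup"
  · rw [if_pos g14] at h; exact absurd (Option.some.inj h) (by decide)
  rw [if_neg g14] at h
  by_cases g15 : s = "lawfirm"
  · rw [if_pos g15] at h; exact absurd (Option.some.inj h) (by decide)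
  rw [if_neg g15] at h
  simp at h

lemma gchar4 (s : String) (h : gchar s = some 4) : s = "mediaorganization" ∨ s = "newspaper" := by
  unfold gchar at h
  by_cases g1 : s = "nonprofit"
  · rw [if_pos g1] at h; exact absurd (Option.some.inj h) (by decide)
  rw [if_neg g1] at h
  by_cases g2 : s = "philanthropy"
  · rw [if_pos g2] at h; exact absurd (Option.some.inj h) (by decide)
  rw [if_neg g2] at h
  by_cases g3 : s = "politicalfundraising"
  · rw [if_pos g3] at h; exact absurd (Option.some.inj h) (by decide)
  rw [if_neg g3] at h
  by_cases g4 : s = "politicalparty"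
  · rw [if_pos g4] at h; exact absurd (Option.some.inj h) (by decide)
  rw [if_neg g4] at h
  by_cases g5 : s = "governmentbody"
  · rw [if_pos g5] at h; exact absurd (Option.some.inj h) (by decide)
  rw [if_neg g5] at h
  by_cases g6 : s = "business"
  · rw [if_pos g6] at h; exact absurd (Option.some.inj h) (by decide)
  rw [if_neg g6] at h
  by_cases g7 : s = "publiccompany"
  · rw [if_pos g7] at h; exact absurd (Option.some.inj h) (by decide)
  rw [if_neg g7] at h
  by_cases g8 : s = "privatecompany"
  · rw [if_pos g8] at h; exact absurd (Option.some.inj h) (by decide)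
  rw [if_neg g8] at h
  by_cases g9 : s = "lobbyingfirm"
  · rw [if_pos g9] at h; exact absurd (Option.some.inj h) (by decide)
  rw [if_neg g9] at h
  by_cases g10 : s = "school"
  · rw [if_pos g10] at h; exact absurd (Option.some.inj h) (by decide)
  rw [if_neg g10] at h
  by_cases g11 : s = "university"
  · rw [if_pos g11] at h; exact absurd (Option.some.inj h) (by decide)
  rw [if_neg g11] at h
  by_cases g12 : s = "mediaorganization"
  · exact Or.inl g12
  rw [if_neg g12] at h
  by_cases g13 : s = "newspaper"
  · exact Or.inr (g13)
  rw [if_neg g13] at h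
  by_cases g14 : s = "industrygroup"
  · rw [if_pos g14] at h; exact absurd (Option.some.inj h) (by decide)
  rw [if_neg g14] at h
  by_cases g15 : s = "lawfirm"
  · rw [if_pos g15] at h; exact absurd (Option.some.inj h) (by decide)
  rw [if_neg g15] at h
  simp at h

lemma gchar5 (s : String) (h : gchar s = some 5) : s = "industrygroup" ∨ s = "lawfirm" := by
  unfold gchar at h
  by_cases g1 : s = "nonprofit"
  · rw [if_pos g1] at h; exact absurd (Option.some.inj h) (by decide)
  rw [if_neg g1] at h
  by_cases g2 : s = "philanthropy"
  · rw [if_pos g2] at h; exact absurd (Option.some.inj h) (by decide)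
  rw [if_neg g2] at h
  by_cases g3 : s = "politicalfundraising"
  · rw [if_pos g3] at h; exact absurd (Option.some.inj h) (by decide)
  rw [if_neg g3] at h
  by_cases g4 : s = "politicalparty"
  · rw [if_pos g4] at h; exact absurd (Option.some.inj h) (by decide)
  rw [if_neg g4] at h
  by_cases g5 : s = "governmentbody"
  · rw [if_pos g5] at h; exact absurd (Option.some.inj h) (by decide)
  rw [if_neg g5] at h
  by_cases g6 : s = "business"
  · rw [if_pos g6] at h; exact absurd (Option.some.inj h) (by decide)
  rw [if_neg g6] at h
  by_cases g7 : s = "publiccompany"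
  · rw [if_pos g7] at h; exact absurd (Option.some.inj h) (by decide)
  rw [if_neg g7] at h
  by_cases g8 : s = "privatecompany"
  · rw [if_pos g8] at h; exact absurd (Option.some.inj h) (by decide)
  rw [if_neg g8] at h
  by_cases g9 : s = "lobbyingfirm"
  · rw [if_pos g9] at h; exact absurd (Option.some.inj h) (by decide)
  rw [if_neg g9] at h
  by_cases g10 : s = "school"
  · rw [if_pos g10] at h; exact absurd (Option.some.inj h) (by decide)
  rw [if_neg g10] at h
  by_cases g11 : s = "university"
  · rw [if_pos g11] at h; exact absurd (Option.some.inj h) (by decide)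
  rw [if_neg g11] at h
  by_cases g12 : s = "mediaorganization"
  · rw [if_pos g12] at h; exact absurd (Option.some.inj h) (by decide)
  rw [if_neg g12] at h
  by_cases g13 : s = "newspaper"
  · rw [if_pos g13] at h; exact absurd (Option.some.inj h) (by decide)
  rw [if_neg g13] at h
  by_cases g14 : s = "industrygroup"
  · exact Or.inl g14
  rw [if_neg g14] at h
  by_cases g15 : s = "lawfirm"
  · exact Or.inr (g15)
  rw [if_neg g15] at h
  simp at h

lemma lsStep_none_iff (acc : Option Nat) (x : String) :
    lsStep acc x = none ↔ acc = none ∧ gchar (PySem.Str.lower x) = none := by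
  unfold lsStep
  rw [rankGet_eq_gchar]
  cases h : gchar (PySem.Str.lower x) <;> cases acc <;> simp
  split <;> simp

lemma fold_none (L : List String) :
    ∀ acc : Option Nat, L.foldl lsStep acc = none ↔
      (acc = none ∧ ∀ e ∈ L, gchar (PySem.Str.lower e) = none) := by
  induction L with
  | nil => simp
  | cons x xs ih =>
    intro acc
    rw [List.foldl_cons, ih, lsStep_none_iff]
    constructor
    · rintro ⟨⟨h1, h2⟩, h3⟩
      exact ⟨h1, by intro e he; rcases List.mem_cons.1 he with rfl | he' <;> [exact h2; exact h3 e he']⟩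
    · rintro ⟨h1, h2⟩
      exact ⟨⟨h1, h2 x (List.mem_cons_self)⟩, fun e he => h2 e (List.mem_cons_of_mem _ he)⟩

lemma fold_some (L : List String) :
    ∀ (acc : Option Nat) (r : Nat), L.foldl lsStep acc = some r →
      ((∃ e ∈ L, gchar (PySem.Str.lower e) = some r) ∨ acc = some r) ∧
      (∀ e ∈ L, ∀ j, gchar (PySem.Str.lower e) = some j → r ≤ j) ∧
      (∀ b, acc = some b → r ≤ b) := by
  induction L with
  | nil => intro acc r h; simp_all
  | cons x xs ih =>
    intro acc r h
    rw [List.foldl_cons] at h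
    obtain ⟨hmem, hmin, hacc⟩ := ih (lsStep acc x) r h
    cases hx : gchar (PySem.Str.lower x) with
    | none =>
      have hstep : lsStep acc x = acc := by simp [lsStep, rankGet_eq_gchar, hx]
      rw [hstep] at hmem hacc
      refine ⟨?_, ?_, hacc⟩
      · rcases hmem with ⟨e, he, hge⟩ | hr
        · exact Or.inl ⟨e, List.mem_cons_of_mem _ he, hge⟩
        · exact Or.inr hr
      · intro e he j hj
        rcases List.mem_cons.1 he with rfl | he'
        · rw [hx] at hj; cases hj
        · exact hmin e he' j hj
    | some rx =>
      cases acc with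
      | none =>
        have hstep : lsStep none x = some rx := by simp [lsStep, rankGet_eq_gchar, hx]
        have hrx : r ≤ rx := hacc rx hstep
        refine ⟨?_, ?_, by simp⟩
        · rcases hmem with ⟨e, he, hge⟩ | hr
          · exact Or.inl ⟨e, List.mem_cons_of_mem _ he, hge⟩
          · rw [hstep] at hr; exact Or.inl ⟨x, List.mem_cons_self, by rw [hx, Option.some_inj.1 hr]⟩
        · intro e he j hj
          rcases List.mem_cons.1 he with rfl | he'
          · rw [hx] at hj; exact Option.some_inj.1 hj ▸ hrx
          · exact hmin e he' j hj
      | some b =>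
        have hstep : lsStep (some b) x = if rx < b then some rx else some b := by
          simp [lsStep, rankGet_eq_gchar, hx]
        by_cases hlt : rx < b
        · rw [if_pos hlt] at hstep
          have hrx : r ≤ rx := hacc rx hstep
          refine ⟨?_, ?_, ?_⟩
          · rcases hmem with ⟨e, he, hge⟩ | hr
            · exact Or.inl ⟨e, List.mem_cons_of_mem _ he, hge⟩
            · rw [hstep] at hr; exact Or.inl ⟨x, List.mem_cons_self, by rw [hx, Option.some_inj.1 hr]⟩
          · intro e he j hj
            rcases List.mem_cons.1 he with rfl | he'
            · rw [hx] at hj; exact Option.some_inj.1 hj ▸ hrx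
            · exact hmin e he' j hj
          · intro c hc; cases hc; omega
        · rw [if_neg hlt] at hstep
          have hb : r ≤ b := hacc b hstep
          refine ⟨?_, ?_, ?_⟩
          · rcases hmem with ⟨e, he, hge⟩ | hr
            · exact Or.inl ⟨e, List.mem_cons_of_mem _ he, hge⟩
            · rw [hstep] at hr; exact Or.inr hr
          · intro e he j hj
            rcases List.mem_cons.1 he with rfl | he'
            · rw [hx] at hj; have := Option.some_inj.1 hj; omega
            · exact hmin e he' j hj
          · intro c hc; cases hc; omega

lemma contains_ofList (S : List String) (k : String) :
    PySem.Set.contains (PySem.Set.ofList S) k = S.contains k := by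
  rw [Bool.eq_iff_iff]
  constructor
  · intro hc
    have hk : k ∈ PySem.Set.ofList S := (PySem.Set.contains_iff _ _).1 hc
    have : k ∈ S := by simpa [PySem.Set.mem_ofList] using hk
    simpa using this
  · intro hl
    have hk : k ∈ S := by simpa using hl
    exact (PySem.Set.contains_iff _ _).2 (by simpa [PySem.Set.mem_ofList] using hk)

-- ===== VERDICT (by name: the statement is the Claim_ definition above) =====
set_option maxHeartbeats 2000000 in
theorem map_littlesis_entity_type_spec : Claim_equal_map_littlesis_entity_type := by
  intro primary_ext extensions _
  unfold Spec_map_littlesis_entity_type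
  by_cases hp : primary_ext = some "Person"
  · simp [map_littlesis_entity_type, map_littlesis_entity_type_alt, hp]
  · set S := extensions.map PySem.Str.lower with hS
    have hmemS : ∀ k : String, k ∈ S ↔ ∃ e ∈ extensions, PySem.Str.lower e = k := by
      intro k; simp [hS]
    cases hfold : extensions.foldl lsStep none with
    | none =>
      have hall := (fold_none extensions none).1 hfold |>.2
      have hc : ∀ k : String, gchar k ≠ none → S.contains k = false := by
        intro k hk
        cases hl : S.contains k with
        | false => rfl
        | true =>
          exfalso
          have hkS : k ∈ S := by simpa using hl
          obtain ⟨e, he, hle⟩ := (hmemS k).1 hkS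
          exact hk (hle ▸ hall e he)
      simp only [map_littlesis_entity_type, map_littlesis_entity_type_alt, hp,
        contains_ofList, ← hS, hfold]
      rw [hc "nonprofit" (by decide), hc "philanthropy" (by decide),
        hc "politicalfundraising" (by decide), hc "politicalparty" (by decide),
        hc "governmentbody" (by decide), hc "business" (by decide),
        hc "publiccompany" (by decide), hc "privatecompany" (by decide),
        hc "lobbyingfirm" (by decide), hc "school" (by decide), hc "university" (by decide),
        hc "mediaorganization" (by decide), hc "newspaper" (by decide),
        hc "industrygroup" (by decide), hc "lawfirm" (by decide)]
      simp
    | some r =>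
      obtain ⟨hmem, hmin, -⟩ := fold_some extensions none r hfold
      have hwit : ∃ e ∈ extensions, gchar (PySem.Str.lower e) = some r := by
        rcases hmem with h | h
        · exact h
        · cases h
      obtain ⟨x, hx, hgx⟩ := hwit
      have hr6 : r < 6 := gchar_lt6 _ _ hgx
      -- keywords of strictly smaller rank are absent
      have habs : ∀ k j, gchar k = some j → j < r → k ∉ S := by
        intro k j hkj hjr hkS
        obtain ⟨e, he, hle⟩ := (hmemS k).1 hkS
        have := hmin e he j (hle ▸ hkj)
        omega
      -- the witness keyword of rank r is present
      have hpres : (PySem.Str.lower x) ∈ S := (hmemS _).2 ⟨x, hx, rfl⟩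
      simp only [map_littlesis_entity_type, map_littlesis_entity_type_alt, hp,
        contains_ofList, ← hS, hfold]
      interval_cases r
      · -- rank 0 : nonprofit
        rcases gchar0 _ hgx with h | h <;> rw [h] at hpres <;> simp [hpres, orgTable]
      · -- rank 1 : political_org
        rcases gchar1 _ hgx with h | h | h <;> rw [h] at hpres
        · simp [hpres, habs "nonprofit" 0 (by decide) (by omega), habs "philanthropy" 0 (by decide) (by omega), orgTable]
        · simp [hpres, habs "nonprofit" 0 (by decide) (by omega), habs "philanthropy" 0 (by decide) (by omega), orgTable]
        · by_cases hq : ("politicalfundraising" ∈ S ∨ "politicalparty" ∈ S) <;>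
            simp [hq, hpres, habs "nonprofit" 0 (by decide) (by omega), habs "philanthropy" 0 (by decide) (by omega), orgTable]
      · -- rank 2 : corporation
        have negs2 : "nonprofit" ∉ S ∧ "philanthropy" ∉ S ∧ "politicalfundraising" ∉ S ∧ "politicalparty" ∉ S ∧ "governmentbody" ∉ S :=
          ⟨habs "nonprofit" 0 (by decide) (by omega), habs "philanthropy" 0 (by decide) (by omega),
           habs "politicalfundraising" 1 (by decide) (by omega), habs "politicalparty" 1 (by decide) (by omega),
           habs "governmentbody" 1 (by decide) (by omega)⟩
        obtain ⟨n1, n2, n3, n4, n5⟩ := negs2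
        rcases gchar2 _ hgx with h | h | h | h <;> rw [h] at hpres
        · simp [hpres, n1, n2, n3, n4, n5, orgTable]
        · simp [hpres, n1, n2, n3, n4, n5, orgTable]
        · simp [hpres, n1, n2, n3, n4, n5, orgTable]
        · by_cases hq : (("business" ∈ S ∨ "publiccompany" ∈ S) ∨ "privatecompany" ∈ S) <;>
            simp [hq, hpres, n1, n2, n3, n4, n5, orgTable]
      · -- rank 3 : unknown (school/university)
        rcases gchar3 _ hgx with h | h <;> rw [h] at hpres <;>
          simp [hpres, habs "nonprofit" 0 (by decide) (by omega), habs "philanthropy" 0 (by decide) (by omega),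
            habs "politicalfundraising" 1 (by decide) (by omega), habs "politicalparty" 1 (by decide) (by omega),
            habs "governmentbody" 1 (by decide) (by omega),
            habs "business" 2 (by decide) (by omega), habs "publiccompany" 2 (by decide) (by omega),
            habs "privatecompany" 2 (by decide) (by omega), habs "lobbyingfirm" 2 (by decide) (by omega), orgTable]
      · -- rank 4 : corporation (media)
        rcases gchar4 _ hgx with h | h <;> rw [h] at hpres <;>
          simp [hpres, habs "nonprofit" 0 (by decide) (by omega), habs "philanthropy" 0 (by decide) (by omega),
            habs "politicalfundraising" 1 (by decide) (by omega), habs "politicalparty" 1 (by decide) (by omega),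
            habs "governmentbody" 1 (by decide) (by omega),
            habs "business" 2 (by decide) (by omega), habs "publiccompany" 2 (by decide) (by omega),
            habs "privatecompany" 2 (by decide) (by omega), habs "lobbyingfirm" 2 (by decide) (by omega),
            habs "school" 3 (by decide) (by omega), habs "university" 3 (by decide) (by omega), orgTable]
      · -- rank 5 : corporation (industrygroup/lawfirm)
        rcases gchar5 _ hgx with h | h <;> rw [h] at hpres <;>
          simp [hpres, habs "nonprofit" 0 (by decide) (by omega), habs "philanthropy" 0 (by decide) (by omega),
            habs "politicalfundraising" 1 (by decide) (by omega), habs "politicalparty" 1 (by decide) (by omega),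
            habs "governmentbody" 1 (by decide) (by omega),
            habs "business" 2 (by decide) (by omega), habs "publiccompany" 2 (by decide) (by omega),
            habs "privatecompany" 2 (by decide) (by omega), habs "lobbyingfirm" 2 (by decide) (by omega),
            habs "school" 3 (by decide) (by omega), habs "university" 3 (by decide) (by omega),
            habs "mediaorganization" 4 (by decide) (by omega), habs "newspaper" 4 (by decide) (by omega), orgTable]
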